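-- pv_equiv track=rewrite | github.com/wxz667/law-kg | src/builder/utils/reference.py | build_alias_groups
-- ===== SOURCE A (Python) =====
-- def build_alias_groups(alias_map: dict[str, str]) -> dict[str, list[tuple[str, str]]]:
--     groups: dict[str, list[tuple[str, str]]] = {}
--     for alias, full_title in alias_map.items():
--         if not alias:
--             continue
--         groups.setdefault(alias[0], []).append((alias, full_title))
--     for key, items in groups.items():
--         groups[key] = sorted(items, key=lambda item: len(item[0]), reverse=True)
--     return groups
-- ===== SOURCE B (Python) =====
-- def build_alias_groups(alias_map: dict[str, str]) -> dict[str, list[tuple[str, str]]]: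
--     pairs = [(a, t) for a, t in alias_map.items() if a]
--     order = list(dict.fromkeys(a[0] for a, _ in pairs))
--     pairs.sort(key=lambda p: len(p[0]), reverse=True)
--     return {c: [p for p in pairs if p[0][0] == c] for c in order}
-- ===== Notes on version B (the rewrite author's own statement) =====
-- stated objective: alternative
-- what changed: B replaces A's setdefault-grouping pass followed by a per-group sort with one filter, one global stable sort of all pairs by alias length descending, and a per-first-character split of that sorted list (key order recovered by an ordered dedup of first characters).
import Mathlib
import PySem

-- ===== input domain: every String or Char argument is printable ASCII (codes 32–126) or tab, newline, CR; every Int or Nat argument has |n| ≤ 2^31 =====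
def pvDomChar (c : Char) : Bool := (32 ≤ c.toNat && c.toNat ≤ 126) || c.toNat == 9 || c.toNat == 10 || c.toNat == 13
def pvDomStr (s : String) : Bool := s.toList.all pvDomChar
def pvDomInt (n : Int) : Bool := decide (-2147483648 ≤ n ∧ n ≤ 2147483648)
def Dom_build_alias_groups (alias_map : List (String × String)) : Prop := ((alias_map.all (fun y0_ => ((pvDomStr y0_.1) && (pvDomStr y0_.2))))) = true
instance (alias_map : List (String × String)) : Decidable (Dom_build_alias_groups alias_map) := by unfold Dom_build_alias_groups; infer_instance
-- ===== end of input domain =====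

-- B sorts the filtered pairs once (stably, by length descending) and splits that sorted list per
-- first character, instead of A's group-with-setdefault-then-sort-each-group; alternative decomposition.

-- shared helper: alias[0] as a one-character string; ported by hand (exact: both Pythons only take
-- s[0] of a string already checked to be non-empty)
def pvHead1 (s : String) : String := String.ofList (s.toList.take 1)

-- ===== PORT A =====
def build_alias_groups (alias_map : List (String × String)) : List (String × List (String × String)) :=
  -- groups.setdefault(alias[0], []).append((alias, full_title))  =  modify key [] (· ++ [pair])
  let groups : PySem.Dict String (List (String × String)) :=
    alias_map.foldl (fun g p =>
      if p.1 = "" then g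
      else g.modify (pvHead1 p.1) [] (fun xs => xs ++ [p])) PySem.Dict.empty
  -- for key, items in groups.items(): groups[key] = sorted(items, key=len of alias, reverse=True)
  let groups2 : PySem.Dict String (List (String × String)) :=
    groups.items.foldl (fun g kv =>
      g.insert kv.1 (PySem.List.sorted kv.2 (fun it => PySem.Str.len it.1) true)) groups
  groups2.items

-- ===== PORT B =====
def build_alias_groups_alt (alias_map : List (String × String)) : List (String × List (String × String)) :=
  let pairs := alias_map.filter (fun p => !(p.1 = ""))
  let order := PySem.List.dedup (pairs.map (fun p => pvHead1 p.1))
  let sortedPairs := PySem.List.sorted pairs (fun p => PySem.Str.len p.1) true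
  order.map (fun c => (c, sortedPairs.filter (fun p => pvHead1 p.1 == c)))

-- ===== PRECONDITION & SPEC =====
def Spec_build_alias_groups (alias_map : List (String × String)) (out : List (String × List (String × String))) : Prop := out = build_alias_groups_alt alias_map
instance (alias_map : List (String × String)) (out : List (String × List (String × String))) : Decidable (Spec_build_alias_groups alias_map out) := by unfold Spec_build_alias_groups; infer_instance

-- ===== CLAIM (what is proved, stated in full; the proofs are below) =====
def Claim_equal_build_alias_groups : Prop := ∀ (alias_map : List (String × String)), Dom_build_alias_groups alias_map → Spec_build_alias_groups alias_map (build_alias_groups alias_map)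

-- ===== LEMMAS AND PROOFS =====

-- inserting before a list every element of which compares true just prepends
theorem pv_insertBy_all_true {α : Type} (b : α → α → Bool) (x : α) (l : List α)
    (h : ∀ z ∈ l, b x z = true) : PySem.List.insertBy b x l = x :: l := by
  induction l with
  | nil => rfl
  | cons y ys _ => simp [PySem.List.insertBy, h y (List.mem_cons_self)]

-- filtering commutes with one stable descending insertion into an already-descending list
theorem pv_filter_insertBy {α : Type} (key : α → Int) (p : α → Bool) (x : α) (acc : List α)
    (h : acc.Pairwise (fun a c => key c ≤ key a)) :
    (PySem.List.insertBy (fun a c => decide (key c < key a)) x acc).filter p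
      = if p x then PySem.List.insertBy (fun a c => decide (key c < key a)) x (acc.filter p)
        else acc.filter p := by
  induction acc with
  | nil => simp [PySem.List.insertBy]; split <;> simp_all
  | cons y ys ih =>
    rw [List.pairwise_cons] at h
    by_cases hb : key y < key x
    · rw [show PySem.List.insertBy (fun a c => decide (key c < key a)) x (y :: ys) = x :: y :: ys by
            simp [PySem.List.insertBy, hb]]
      by_cases hp : p x
      · rw [List.filter_cons_of_pos hp, if_pos hp, pv_insertBy_all_true]
        intro z hz
        simp only [List.mem_filter] at hz
        rcases List.mem_cons.mp hz.1 with h1 | h1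
        · subst h1; simp [hb]
        · have := h.1 z h1; simp; omega
      · rw [List.filter_cons_of_neg hp, if_neg hp]
    · rw [show PySem.List.insertBy (fun a c => decide (key c < key a)) x (y :: ys)
            = y :: PySem.List.insertBy (fun a c => decide (key c < key a)) x ys by
            simp [PySem.List.insertBy, hb]]
      by_cases hp : p y
      · rw [List.filter_cons_of_pos hp, List.filter_cons_of_pos hp, ih h.2]
        split
        · rw [show PySem.List.insertBy (fun a c => decide (key c < key a)) x (y :: ys.filter p)
              = y :: PySem.List.insertBy (fun a c => decide (key c < key a)) x (ys.filter p) by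
              simp [PySem.List.insertBy, hb]]
        · rfl
      · rw [List.filter_cons_of_neg hp, List.filter_cons_of_neg hp, ih h.2]

-- filtering commutes with the stable reverse sort
theorem pv_filter_sorted {α : Type} (key : α → Int) (p : α → Bool) (xs : List α) :
    (PySem.List.sorted xs key true).filter p = PySem.List.sorted (xs.filter p) key true := by
  induction xs using List.reverseRecOn with
  | nil => rfl
  | append_singleton ys x ih =>
    rw [PySem.List.sorted_rev_eq_foldl_insertBy, List.foldl_append, List.foldl_cons, List.foldl_nil,
        ← PySem.List.sorted_rev_eq_foldl_insertBy]
    rw [pv_filter_insertBy key p x _ (PySem.List.sorted_pairwise_rev ys key), ih]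
    by_cases hp : p x
    · rw [if_pos hp, List.filter_append, List.filter_cons_of_pos hp, List.filter_nil,
          PySem.List.sorted_rev_eq_foldl_insertBy (ys.filter p ++ [x]), List.foldl_append,
          List.foldl_cons, List.foldl_nil, ← PySem.List.sorted_rev_eq_foldl_insertBy]
    · rw [if_neg hp, List.filter_append, List.filter_cons_of_neg hp, List.filter_nil,
          List.append_nil]

-- getD after folding inserts over an association list that does not mention the key
theorem pv_getD_foldl_insert_not_mem {κ ν β : Type} [BEq κ] [LawfulBEq κ] [DecidableEq κ]
    (f : List β → ν) (L : List (κ × List β)) (g : PySem.Dict κ ν) (k : κ) (dflt : ν)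
    (hk : k ∉ L.map (·.1)) :
    (L.foldl (fun g kv => g.insert kv.1 (f kv.2)) g).getD k dflt = g.getD k dflt := by
  induction L generalizing g with
  | nil => rfl
  | cons kv L ih =>
    simp only [List.map_cons, List.mem_cons, not_or] at hk
    rw [List.foldl_cons, ih _ hk.2, PySem.Dict.getD_insert_of_ne (hne := hk.1)]

-- getD after folding inserts over a key-distinct association list: the matching entry wins
theorem pv_getD_foldl_insert_mem {κ ν β : Type} [BEq κ] [LawfulBEq κ] [DecidableEq κ]
    (f : List β → ν) (L : List (κ × List β)) (g : PySem.Dict κ ν) (k : κ) (v : List β) (dflt : ν)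
    (hk : (k, v) ∈ L) (hnd : (L.map (·.1)).Nodup) :
    (L.foldl (fun g kv => g.insert kv.1 (f kv.2)) g).getD k dflt = f v := by
  induction L generalizing g with
  | nil => simp at hk
  | cons kv L ih =>
    simp only [List.map_cons, List.nodup_cons] at hnd
    rcases List.mem_cons.mp hk with h1 | h1
    · subst h1
      rw [List.foldl_cons, pv_getD_foldl_insert_not_mem f L _ k dflt (by simpa using hnd.1),
          PySem.Dict.getD_insert_self]
    · rw [List.foldl_cons]; exact ih _ h1 hnd.2

-- updating a set with its own elements changes nothing
theorem pv_set_update_self {α : Type} [BEq α] [LawfulBEq α] (s : PySem.Set α) :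
    PySem.Set.update s s = s := by
  rw [PySem.Set.update_eq_append_filter]
  have hnil : (PySem.Set.ofList s).filter (fun y => !PySem.Set.contains s y) = [] := by
    rw [List.filter_eq_nil_iff]
    intro a ha
    have ha' : a ∈ s := (PySem.Set.mem_ofList s a).mp ha
    simp [ha']
  rw [hnil, List.append_nil]

-- ===== VERDICT (by name: the statement is the Claim_ definition above) =====
theorem build_alias_groups_spec : Claim_equal_build_alias_groups := by
  intro alias_map _
  show build_alias_groups alias_map = build_alias_groups_alt alias_map
  simp only [build_alias_groups, build_alias_groups_alt]
  set F := alias_map.filter (fun p => !(p.1 = "")) with hF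
  -- the guarded fold is the plain fold over the filtered list
  have hA1 : alias_map.foldl (fun g p =>
      if p.1 = "" then g
      else g.modify (pvHead1 p.1) [] (fun xs => xs ++ [p])) PySem.Dict.empty
      = F.foldl (fun g p => g.modify (pvHead1 p.1) [] (fun xs => xs ++ [p])) PySem.Dict.empty := by
    rw [hF, List.foldl_filter]
    congr 1
    funext g p
    by_cases h : p.1 = "" <;> simp [h]
  rw [hA1]
  set groups := F.foldl (fun g p => g.modify (pvHead1 p.1) [] (fun xs => xs ++ [p]))
      PySem.Dict.empty with hg
  have hkeys : groups.keys = PySem.Set.ofList (F.map (fun p => pvHead1 p.1)) := by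
    rw [hg, PySem.Dict.keys_foldl_modify_key F (fun p => pvHead1 p.1) [] (fun _ p xs => xs ++ [p]),
        PySem.Dict.keys_empty, PySem.Set.update_nil_left]
  have hnd : groups.keys.Nodup := by
    rw [hg]
    exact PySem.Dict.nodup_keys_foldl_modify_key F (fun p => pvHead1 p.1) [] (fun _ p xs => xs ++ [p])
      PySem.Dict.empty (by simp [PySem.Dict.keys_empty])
  -- per-key contents of groups: the filtered pairs with that first character, in input order
  have hgetD : ∀ c, groups.getD c [] = F.filter (fun p => pvHead1 p.1 == c) := by
    intro c
    have hmap : F.foldl (fun g p => g.modify (pvHead1 p.1) [] (fun xs => xs ++ [p])) PySem.Dict.empty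
        = (F.map (fun p => (pvHead1 p.1, p))).foldl
            (fun d q => d.modify q.1 [] (fun xs => xs ++ [q.2])) PySem.Dict.empty := by
      rw [List.foldl_map]
    rw [hg, hmap, PySem.Dict.getD_foldl_modify_append]
    simp [List.filter_map, Function.comp_def]
  -- the second loop rewrites every existing key in place: keys unchanged, values sorted
  have hitems1 : groups.items.map (·.1) = groups.keys := rfl
  have hkeys2 : (groups.items.foldl (fun g kv =>
      g.insert kv.1 (PySem.List.sorted kv.2 (fun it => PySem.Str.len it.1) true)) groups).keys
      = groups.keys := by
    rw [PySem.Dict.keys_foldl_insert_key groups.items (fun kv => kv.1)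
        (fun _ kv => PySem.List.sorted kv.2 (fun it => PySem.Str.len it.1) true) groups]
    rw [hitems1, pv_set_update_self]
  have hnd2 : (groups.items.foldl (fun g kv =>
      g.insert kv.1 (PySem.List.sorted kv.2 (fun it => PySem.Str.len it.1) true)) groups).keys.Nodup := by
    rw [hkeys2]; exact hnd
  rw [PySem.Dict.items_eq_map_keys _ hnd2 [], hkeys2]
  have hgetD2 : ∀ k ∈ groups.keys, (groups.items.foldl (fun g kv =>
      g.insert kv.1 (PySem.List.sorted kv.2 (fun it => PySem.Str.len it.1) true)) groups).getD k []
      = PySem.List.sorted (groups.getD k []) (fun it => PySem.Str.len it.1) true := by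
    intro k hk
    refine pv_getD_foldl_insert_mem _ groups.items groups k (groups.getD k []) [] ?_
      (by rw [hitems1]; exact hnd)
    rw [PySem.Dict.items_eq_map_keys groups hnd []]
    exact List.mem_map.mpr ⟨k, hk, rfl⟩
  have hded : PySem.List.dedup (F.map (fun p => pvHead1 p.1))
      = PySem.Set.ofList (F.map (fun p => pvHead1 p.1)) := rfl
  rw [hded, ← hkeys]
  refine List.map_congr_left ?_
  intro k hk
  rw [hgetD2 k hk, hgetD k, pv_filter_sorted]
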